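-- pv_equiv track=rewrite | github.com/MaxHalldin/WienFilter | srcMAX/pythionMAX/_routinesMAX/heatmapMAX.py | filter_ticklabels
-- ===== SOURCE A (Python) =====
-- def filter_ticklabels(labels: list[int], max_labels: int):
--     labels = [str(i) for i in labels]
--     while len([s for s in labels if s != '']) > max_labels:
--         # Iteratively set every other label to '' until number of remaining labels are equal or lower than max:labels
--         remove_next = True
--         for i, s in enumerate(labels):
--             if s == '':
--                 continue
--             remove_next = not remove_next
--             if remove_next:
--                 labels[i] = ''
--     return labels
-- ===== SOURCE B (Python) =====
-- def filter_ticklabels(labels: list[int], max_labels: int):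
--     # One pass: the surviving labels are exactly those at indices divisible by the
--     # smallest power of two `step` with ceil(n/step) <= max_labels.
--     n = len(labels)
--     if max_labels >= 1:
--         c = -(-n // max_labels)            # ceil(n / max_labels)
--         step = 1 << (c - 1).bit_length()   # smallest power of two >= c
--     else:
--         step = 1
--     return [str(x) if i % step == 0 else '' for i, x in enumerate(labels)]
-- ===== Notes on version B (the rewrite author's own statement) =====
-- stated objective: faster
-- what changed: Instead of repeatedly sweeping the list and blanking every other nonempty label until few enough remain, B computes the smallest power of two step with ceil(n/step) <= max_labels in closed form (ceiling division plus bit_length) and builds the result in a single pass keeping exactly the indices divisible by step.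
import Mathlib
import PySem

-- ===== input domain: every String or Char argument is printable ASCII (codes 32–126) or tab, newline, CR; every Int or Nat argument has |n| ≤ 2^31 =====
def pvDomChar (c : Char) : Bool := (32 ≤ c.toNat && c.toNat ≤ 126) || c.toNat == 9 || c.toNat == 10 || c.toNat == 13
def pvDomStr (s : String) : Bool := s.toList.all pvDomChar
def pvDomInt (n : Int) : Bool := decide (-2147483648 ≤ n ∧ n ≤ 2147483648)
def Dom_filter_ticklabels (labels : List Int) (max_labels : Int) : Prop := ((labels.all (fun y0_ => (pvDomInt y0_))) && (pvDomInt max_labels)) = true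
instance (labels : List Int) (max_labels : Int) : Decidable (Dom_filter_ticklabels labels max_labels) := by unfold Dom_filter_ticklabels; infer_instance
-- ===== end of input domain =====

-- B replaces A's repeated blank-every-other-label passes by one pass keeping exactly the
-- indices divisible by the smallest power of two `step` with ceil(n/step) ≤ max_labels.

-- ===== PORT A =====
-- the inner `for i, s in enumerate(labels)` pass: blanks every second nonempty label
def pvPassA : Bool → List String → List String
  | _, [] => []
  | rn, s :: rest =>
    if s = "" then s :: pvPassA rn rest
    else
      let rn' := !rn
      (if rn' then "" else s) :: pvPassA rn' rest

-- the `while` loop; fuel = labels.length is enough for every input admitted by Pre_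
def pvLoopA (fuel : Nat) (max_labels : Int) (ls : List String) : List String :=
  match fuel with
  | 0 => ls
  | f + 1 =>
    if (((ls.filter (fun s => s != "")).length : Int) > max_labels) then
      pvLoopA f max_labels (pvPassA true ls)
    else ls

def filter_ticklabels (labels : List Int) (max_labels : Int) : List String :=
  pvLoopA labels.length max_labels (labels.map PySem.Int.toStr)

-- ===== PORT B =====
def filter_ticklabels_alt (labels : List Int) (max_labels : Int) : List String :=
  let n := labels.length
  let step : Nat :=
    if 1 ≤ max_labels then
      let c : Int := -(PySem.Int.floordiv (-(n : Int)) max_labels)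
      2 ^ PySem.Int.bitLength (c - 1)
    else 1
  (PySem.List.enumerate labels).map
    (fun p => if PySem.Int.mod p.1 (step : Int) = 0 then PySem.Int.toStr p.2 else "")

-- ===== PRECONDITION & SPEC =====
-- Pre_ excludes exactly the inputs on which A's while loop never terminates, so A
-- returns no value there (max_labels ≤ 0 with a nonempty list, or max_labels < 0
-- with an empty list).
def Pre_filter_ticklabels (labels : List Int) (max_labels : Int) : Prop :=
  1 ≤ max_labels ∨ (labels = [] ∧ 0 ≤ max_labels)
instance (labels : List Int) (max_labels : Int) : Decidable (Pre_filter_ticklabels labels max_labels) := by unfold Pre_filter_ticklabels; infer_instance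

def pvWitness_filter_ticklabels : List Int × Int := ([1, 2, 3, 4, 5], 2)

def Spec_filter_ticklabels (labels : List Int) (max_labels : Int) (out : List String) : Prop := out = filter_ticklabels_alt labels max_labels
instance (labels : List Int) (max_labels : Int) (out : List String) : Decidable (Spec_filter_ticklabels labels max_labels out) := by unfold Spec_filter_ticklabels; infer_instance

-- ===== CLAIM (what is proved, stated in full; the proofs are below) =====
def Claim_equal_filter_ticklabels : Prop := ∀ (labels : List Int) (max_labels : Int), Dom_filter_ticklabels labels max_labels → Pre_filter_ticklabels labels max_labels → Spec_filter_ticklabels labels max_labels (filter_ticklabels labels max_labels)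

-- ===== LEMMAS AND PROOFS =====

-- `str(x)` is never the empty string
lemma pv_toDigitsCore_ne_nil_of_ne : ∀ (f n : Nat) (l : List Char), l ≠ [] →
    Nat.toDigitsCore 10 f n l ≠ [] := by
  intro f
  induction f with
  | zero => intro n l h; simpa [Nat.toDigitsCore] using h
  | succ f ih =>
    intro n l h
    simp only [Nat.toDigitsCore]
    split
    · simp
    · exact ih _ _ (by simp)

lemma pv_toStr_ne_empty (x : Int) : PySem.Int.toStr x ≠ "" := by
  intro h
  have h2 : (PySem.Int.toStr x).toList = [] := by rw [h]; rfl
  rw [PySem.Int.toList_toStr] at h2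
  unfold PySem.Int.toChars at h2
  split at h2
  · simp at h2
  · unfold Nat.toDigits at h2
    simp only [Nat.toDigitsCore] at h2
    split at h2 <;> first
      | simp at h2
      | exact pv_toDigitsCore_ne_nil_of_ne _ _ _ (by simp) h2

-- ceiling division on Nat
def pvCdiv (n step : Nat) : Nat := (n + step - 1) / step

-- the state of A's list after k passes: index i keeps its label iff 2^k ∣ i
def pvMask (step : Nat) : Nat → List Int → List String
  | _, [] => []
  | i, x :: xs => (if i % step = 0 then PySem.Int.toStr x else "") :: pvMask step (i + 1) xs

-- arithmetic helpers --------------------------------------------------------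

lemma pv_cdiv_succ_of_not {step i : Nat} (hs : 0 < step) (h : i % step ≠ 0) :
    pvCdiv (i + 1) step = pvCdiv i step := by
  have e := Nat.div_add_mod i step
  have hu : i % step < step := Nat.mod_lt _ hs
  have e1 : i + 1 + step - 1 = i % step + step * (i / step + 1) := by
    rw [Nat.mul_succ]; omega
  have e2 : i + step - 1 = (i % step - 1) + step * (i / step + 1) := by
    rw [Nat.mul_succ]; omega
  unfold pvCdiv
  rw [e1, e2, Nat.add_mul_div_left _ _ hs, Nat.add_mul_div_left _ _ hs,
    Nat.div_eq_of_lt hu, Nat.div_eq_of_lt (show i % step - 1 < step by omega)]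

lemma pv_cdiv_of_dvd {step i : Nat} (hs : 0 < step) (h : i % step = 0) :
    pvCdiv i step = i / step ∧ pvCdiv (i + 1) step = i / step + 1 := by
  have e := Nat.div_add_mod i step
  constructor
  · have e1 : i + step - 1 = (step - 1) + step * (i / step) := by omega
    unfold pvCdiv
    rw [e1, Nat.add_mul_div_left _ _ hs, Nat.div_eq_of_lt (by omega)]
    omega
  · have e2 : i + 1 + step - 1 = 0 + step * (i / step + 1) := by
      rw [Nat.mul_succ]; omega
    unfold pvCdiv
    rw [e2, Nat.add_mul_div_left _ _ hs, Nat.zero_div]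
    omega

lemma pv_mod_two_of_not {step i : Nat} (hs : 0 < step) (h : i % step ≠ 0) :
    ¬ i % (2 * step) = 0 := by
  intro h2
  have hd : step ∣ i := dvd_trans (dvd_mul_left step 2) (Nat.dvd_of_mod_eq_zero h2)
  obtain ⟨k, hk⟩ := hd
  exact h (by rw [hk]; exact Nat.mul_mod_right step k)

lemma pv_mod_two_iff {step i : Nat} (hs : 0 < step) (h : i % step = 0) :
    (i % (2 * step) = 0 ↔ (i / step) % 2 = 0) := by
  have e := Nat.div_add_mod i step
  have e2 := Nat.div_add_mod (i / step) 2
  have hq2 : i / step % 2 ≤ 1 := by omega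
  have hi : i = 2 * step * (i / step / 2) + step * (i / step % 2) := by
    calc i = step * (i / step) := by omega
    _ = step * (2 * (i / step / 2) + i / step % 2) := (congrArg (step * ·) e2.symm)
    _ = 2 * step * (i / step / 2) + step * (i / step % 2) := by ring
  have hlt : step * (i / step % 2) < 2 * step := by
    have h3 : step * (i / step % 2) ≤ step * 1 := Nat.mul_le_mul (le_refl _) hq2
    omega
  have hm : i % (2 * step) = step * (i / step % 2) := by
    conv_lhs => rw [hi]
    rw [Nat.mul_add_mod]
    exact Nat.mod_eq_of_lt hlt
  rw [hm, Nat.mul_eq_zero]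
  omega

lemma pv_cdiv_zero {step : Nat} (hs : 0 < step) : pvCdiv 0 step = 0 := by
  unfold pvCdiv
  exact Nat.div_eq_of_lt (by omega)

lemma pv_cdiv_bounds (n M : Nat) (hM : 0 < M) :
    n ≤ pvCdiv n M * M ∧ pvCdiv n M * M < n + M := by
  unfold pvCdiv
  have e : (n + M - 1) / M * M + (n + M - 1) % M = n + M - 1 := by
    rw [Nat.mul_comm]; exact Nat.div_add_mod _ _
  have hlt : (n + M - 1) % M < M := Nat.mod_lt _ hM
  obtain ⟨P, hP⟩ : ∃ P, (n + M - 1) / M * M = P := ⟨_, rfl⟩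
  rw [hP] at e ⊢
  omega

lemma pv_cdiv_le_iff {n s M : Nat} (hs : 0 < s) : pvCdiv n s ≤ M ↔ n ≤ M * s := by
  unfold pvCdiv
  rw [← Nat.lt_add_one_iff, Nat.div_lt_iff_lt_mul hs]
  have e3 : (M + 1) * s = M * s + s := by ring
  rw [e3]
  obtain ⟨P, hP⟩ : ∃ P, M * s = P := ⟨_, rfl⟩
  rw [hP]
  omega

lemma pv_bitLen_le (m : Nat) : PySem.Int.bitLength (m : Int) ≤ m := by
  induction m using Nat.strong_induction_on with
  | _ m ih =>
    match m with
    | 0 => simp [PySem.Int.bitLength_zero]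
    | m + 1 =>
      rw [PySem.Int.bitLength_natCast (by omega)]
      have h1 := ih ((m + 1) / 2) (by omega)
      omega

-- structural lemmas ---------------------------------------------------------

lemma pv_pass_mask {step : Nat} (hs : 0 < step) : ∀ (xs : List Int) (i : Nat),
    pvPassA (decide (pvCdiv i step % 2 = 0)) (pvMask step i xs) = pvMask (2 * step) i xs := by
  intro xs
  induction xs with
  | nil => intro i; rfl
  | cons x xs ih =>
    intro i
    by_cases h : i % step = 0
    · obtain ⟨h1, h2⟩ := pv_cdiv_of_dvd hs h
      have hne := pv_toStr_ne_empty x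
      have hmod := pv_mod_two_iff hs h
      simp only [pvMask, if_pos h]
      simp only [pvPassA, if_neg hne]
      have hbool : (!decide (pvCdiv i step % 2 = 0)) = decide (pvCdiv (i + 1) step % 2 = 0) := by
        by_cases hp : pvCdiv i step % 2 = 0
        · have hv : pvCdiv (i + 1) step % 2 = 1 := by omega
          simp [hp, hv]
        · have hv : pvCdiv (i + 1) step % 2 = 0 := by omega
          simp [hp, hv]
      rw [hbool, ih]
      congr 1
      by_cases hp : i % (2 * step) = 0
      · have hq : i / step % 2 = 0 := hmod.mp hp
        have hv : pvCdiv (i + 1) step % 2 = 1 := by omega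
        simp [hp, hv]
      · have hq : ¬ i / step % 2 = 0 := fun hq => hp (hmod.mpr hq)
        have hv : pvCdiv (i + 1) step % 2 = 0 := by omega
        simp [hp, hv]
    · have h2 := pv_cdiv_succ_of_not hs h
      have hm := pv_mod_two_of_not hs h
      simp only [pvMask, if_neg h, if_neg hm]
      simp only [pvPassA, if_true]
      rw [← h2, ih]

lemma pv_count_mask {step : Nat} (hs : 0 < step) : ∀ (xs : List Int) (i : Nat),
    ((pvMask step i xs).filter (fun s => s != "")).length + pvCdiv i step
      = pvCdiv (i + xs.length) step := by
  intro xs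
  induction xs with
  | nil => intro i; simp [pvMask]
  | cons x xs ih =>
    intro i
    by_cases h : i % step = 0
    · obtain ⟨h1, h2⟩ := pv_cdiv_of_dvd hs h
      have hb : (PySem.Int.toStr x != "") = true := by
        simpa using pv_toStr_ne_empty x
      have hih := ih (i + 1)
      simp only [pvMask, if_pos h, List.filter_cons, hb, if_true, List.length_cons]
      rw [show i + (xs.length + 1) = i + 1 + xs.length from by omega]
      omega
    · have h2 := pv_cdiv_succ_of_not hs h
      have hih := ih (i + 1)
      simp only [pvMask, if_neg h, List.filter_cons, bne_self_eq_false, List.length_cons,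
        Bool.false_eq_true, if_false]
      rw [show i + (xs.length + 1) = i + 1 + xs.length from by omega]
      omega

lemma pv_enum_mask {step : Nat} (hs : 0 < step) : ∀ (xs : List Int) (s : Nat),
    (PySem.List.enumerate xs (s : Int)).map
        (fun p => if PySem.Int.mod p.1 (step : Int) = 0 then PySem.Int.toStr p.2 else "")
      = pvMask step s xs := by
  intro xs
  induction xs with
  | nil => intro s; simp [PySem.List.enumerate_nil, pvMask]
  | cons x xs ih =>
    intro s
    rw [PySem.List.enumerate_cons, List.map_cons]
    have hcast : ((s : Int) + 1) = ((s + 1 : Nat) : Int) := by push_cast; ring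
    rw [hcast, ih]
    simp only [pvMask, PySem.Int.mod_natCast, Nat.cast_eq_zero]

lemma pv_mask_one : ∀ (xs : List Int) (i : Nat), pvMask 1 i xs = xs.map PySem.Int.toStr := by
  intro xs
  induction xs with
  | nil => intro i; rfl
  | cons x xs ih => intro i; simp [pvMask, ih, Nat.mod_one]

lemma pv_loop_mask (labels : List Int) (M : Nat) (hM1 : 1 ≤ M) (K : Nat)
    (hK1 : pvCdiv labels.length (2 ^ K) ≤ M)
    (hK2 : ∀ t, t < K → M < pvCdiv labels.length (2 ^ t)) :
    ∀ (fuel j : Nat), j ≤ K → K ≤ j + fuel →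
      pvLoopA fuel (M : Int) (pvMask (2 ^ j) 0 labels) = pvMask (2 ^ K) 0 labels := by
  intro fuel
  induction fuel with
  | zero =>
    intro j hjK hKj
    have hj : j = K := by omega
    subst hj
    rfl
  | succ f ih =>
    intro j hjK hKj
    have hp2 : 0 < 2 ^ j := Nat.two_pow_pos j
    have hcm := pv_count_mask hp2 labels 0
    rw [pv_cdiv_zero hp2] at hcm
    simp only [Nat.add_zero, Nat.zero_add] at hcm
    simp only [pvLoopA]
    by_cases hc : M < pvCdiv labels.length (2 ^ j)
    · have hcond : (((pvMask (2 ^ j) 0 labels).filter (fun s => s != "")).length : Int)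
          > (M : Int) := by
        rw [hcm]; exact_mod_cast hc
      rw [if_pos hcond]
      have hjK' : j < K := by
        by_contra hh
        have hj : j = K := by omega
        subst hj
        omega
      have hpass := pv_pass_mask hp2 labels 0
      rw [pv_cdiv_zero hp2] at hpass
      norm_num at hpass
      rw [show 2 * 2 ^ j = 2 ^ (j + 1) from by rw [pow_succ]; ring] at hpass
      rw [hpass]
      exact ih (j + 1) (by omega) (by omega)
    · have hle : (((pvMask (2 ^ j) 0 labels).filter (fun s => s != "")).length : Int)
          ≤ (M : Int) := by
        rw [hcm]; exact_mod_cast Nat.le_of_not_lt hc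
      rw [if_neg (not_lt.mpr hle)]
      have hj : j = K := by
        by_contra hh
        exact hc (hK2 j (by omega))
      rw [hj]

-- ceil in Int (as B computes it) equals pvCdiv
lemma pv_ceil_int_eq (n M : Nat) (hM : 1 ≤ M) :
    -(PySem.Int.floordiv (-(n : Int)) (M : Int)) = ((pvCdiv n M : Nat) : Int) := by
  rw [PySem.Int.neg_floordiv_neg_eq_iff_of_pos (by exact_mod_cast hM)]
  obtain ⟨h1, h2⟩ := pv_cdiv_bounds n M (by omega)
  constructor
  · have h2' : ((pvCdiv n M * M : Nat) : Int) < ((n + M : Nat) : Int) := by exact_mod_cast h2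
    push_cast at h2'
    nlinarith [h2']
  · have h1' : ((n : Nat) : Int) ≤ ((pvCdiv n M * M : Nat) : Int) := by exact_mod_cast h1
    push_cast at h1'
    linarith

-- B's result as a mask (nonempty labels case)
lemma pv_alt_eq (labels : List Int) (max_labels : Int) (hmax : 1 ≤ max_labels)
    (hn : 0 < labels.length) :
    filter_ticklabels_alt labels max_labels
      = pvMask (2 ^ PySem.Int.bitLength ((pvCdiv labels.length max_labels.toNat - 1 : Nat) : Int))
          0 labels := by
  have hM1 : 1 ≤ max_labels.toNat := by omega
  have hMc : ((max_labels.toNat : Nat) : Int) = max_labels := Int.toNat_of_nonneg (by omega)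
  have hceil : -(PySem.Int.floordiv (-(labels.length : Int)) max_labels)
      = ((pvCdiv labels.length max_labels.toNat : Nat) : Int) := by
    rw [← hMc]; exact pv_ceil_int_eq _ _ hM1
  have hc1 : 1 ≤ pvCdiv labels.length max_labels.toNat := by
    by_contra hh
    have h0 := (@pv_cdiv_le_iff labels.length max_labels.toNat 0 (by omega)).mp (by omega)
    rw [Nat.zero_mul] at h0
    omega
  have hKc : (((pvCdiv labels.length max_labels.toNat : Nat) : Int) - 1)
      = ((pvCdiv labels.length max_labels.toNat - 1 : Nat) : Int) := by omega
  simp only [filter_ticklabels_alt, if_pos hmax]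
  rw [hceil, hKc]
  simpa using pv_enum_mask (Nat.two_pow_pos _) labels 0

-- A's loop computes the same mask (nonempty labels case)
lemma pv_main_nonempty (labels : List Int) (M : Nat) (hM1 : 1 ≤ M) (hn : 0 < labels.length) :
    pvLoopA labels.length ((M : Nat) : Int) (labels.map PySem.Int.toStr)
      = pvMask (2 ^ PySem.Int.bitLength ((pvCdiv labels.length M - 1 : Nat) : Int)) 0 labels := by
  have hc1 : 1 ≤ pvCdiv labels.length M := by
    by_contra hh
    have h0 := (@pv_cdiv_le_iff labels.length M 0 (by omega)).mp (by omega)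
    rw [Nat.zero_mul] at h0
    omega
  have hltK := PySem.Int.lt_two_pow_bitLength ((pvCdiv labels.length M - 1 : Nat) : Int)
  rw [Int.natAbs_natCast] at hltK
  have hb := pv_cdiv_bounds labels.length M (by omega)
  have hK1 : pvCdiv labels.length
      (2 ^ PySem.Int.bitLength ((pvCdiv labels.length M - 1 : Nat) : Int)) ≤ M := by
    rw [pv_cdiv_le_iff (Nat.two_pow_pos _)]
    calc labels.length ≤ pvCdiv labels.length M * M := hb.1
      _ ≤ 2 ^ PySem.Int.bitLength ((pvCdiv labels.length M - 1 : Nat) : Int) * M :=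
          Nat.mul_le_mul (by omega) (le_refl M)
      _ = M * 2 ^ PySem.Int.bitLength ((pvCdiv labels.length M - 1 : Nat) : Int) :=
          Nat.mul_comm _ _
  have hK2 : ∀ t, t < PySem.Int.bitLength ((pvCdiv labels.length M - 1 : Nat) : Int) →
      M < pvCdiv labels.length (2 ^ t) := by
    intro t ht
    rcases Nat.eq_zero_or_pos (pvCdiv labels.length M - 1) with hc0 | hcpos
    · exfalso
      rw [hc0] at ht
      simp [PySem.Int.bitLength_zero] at ht
    · have hle := PySem.Int.two_pow_bitLength_le ((pvCdiv labels.length M - 1 : Nat) : Int)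
        (by exact_mod_cast Nat.pos_iff_ne_zero.mp hcpos)
      rw [Int.natAbs_natCast] at hle
      have h2t : 2 ^ t ≤ pvCdiv labels.length M - 1 := by
        calc 2 ^ t
            ≤ 2 ^ (PySem.Int.bitLength ((pvCdiv labels.length M - 1 : Nat) : Int) - 1) :=
              Nat.pow_le_pow_right (by omega) (by omega)
          _ ≤ pvCdiv labels.length M - 1 := hle
      by_contra hcon
      rw [Nat.not_lt] at hcon
      rw [pv_cdiv_le_iff (Nat.two_pow_pos t)] at hcon
      have h3 : M * 2 ^ t ≤ M * (pvCdiv labels.length M - 1) :=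
        Nat.mul_le_mul (le_refl M) h2t
      have h4 : M * (pvCdiv labels.length M - 1) + M = M * pvCdiv labels.length M := by
        rw [← Nat.mul_succ]
        congr 1
        omega
      have h5 : pvCdiv labels.length M * M < labels.length + M := hb.2
      have h6 : M * pvCdiv labels.length M = pvCdiv labels.length M * M := Nat.mul_comm _ _
      linarith [h3, h4, h5, h6, hcon]
  have hKn : PySem.Int.bitLength ((pvCdiv labels.length M - 1 : Nat) : Int) ≤ labels.length := by
    have h1 := pv_bitLen_le (pvCdiv labels.length M - 1)
    have h2 : pvCdiv labels.length M ≤ labels.length := by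
      rw [pv_cdiv_le_iff (by omega)]
      calc labels.length = labels.length * 1 := by ring
        _ ≤ labels.length * M := Nat.mul_le_mul (le_refl _) hM1
    omega
  have hstart : labels.map PySem.Int.toStr = pvMask (2 ^ 0) 0 labels := by
    rw [pow_zero]
    exact (pv_mask_one labels 0).symm
  rw [hstart]
  exact pv_loop_mask labels M hM1 _ hK1 hK2 labels.length 0 (by omega) (by omega)

-- ===== VERDICT (by name: the statement is the Claim_ definition above) =====
theorem filter_ticklabels_spec : Claim_equal_filter_ticklabels := by
  intro labels max_labels hdom hpre
  unfold Spec_filter_ticklabels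
  by_cases hnil : labels = []
  · subst hnil
    simp [filter_ticklabels, filter_ticklabels_alt, pvLoopA, PySem.List.enumerate_nil]
  · have hmax : 1 ≤ max_labels := by
      rcases hpre with h | ⟨h, _⟩
      · exact h
      · exact absurd h hnil
    have hn : 0 < labels.length := by
      cases labels with
      | nil => exact absurd rfl hnil
      | cons a l => simp
    have hM1 : 1 ≤ max_labels.toNat := by omega
    have hMc : ((max_labels.toNat : Nat) : Int) = max_labels := Int.toNat_of_nonneg (by omega)
    unfold filter_ticklabels
    rw [pv_alt_eq labels max_labels hmax hn]
    conv_lhs => rw [← hMc]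
    exact pv_main_nonempty labels max_labels.toNat hM1 hn
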